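-- pv_equiv track=rewrite | github.com/HeeJohn/coding | programmers/DFS/BFS/match_puzzle.py | adjust_point
-- ===== SOURCE A (Python) =====
-- def adjust_point(b) :
--
--     min_x = min(p[0] for p in b)
--     min_y = min(p[1] for p in b)
--     max_x = max(p[0] for p in b)
--     max_y = max(p[1] for p in b)
--     width = max_x - min_x + 1
--     height = max_y - min_y + 1
--     bigger = max(height, width)
--
--     square = [[0] * bigger for _ in range(bigger)]
--
--     for p in b:
--         adj_x = p[0] - min_x
--         adj_y = p[1] - min_y
--         square[adj_y][adj_x] = 1
--
--     return square
-- ===== SOURCE B (Python) =====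
-- def adjust_point(b):
--     min_x = min(p[0] for p in b)
--     min_y = min(p[1] for p in b)
--     max_x = max(p[0] for p in b)
--     max_y = max(p[1] for p in b)
--     width = max_x - min_x + 1
--     height = max_y - min_y + 1
--     bigger = max(height, width)
--     pts = {(p[0] - min_x, p[1] - min_y) for p in b}
--     return [[1 if (x, y) in pts else 0 for x in range(bigger)] for y in range(bigger)]
-- ===== Notes on version B (the rewrite author's own statement) =====
-- stated objective: idiomatic
-- what changed: Instead of allocating a zero grid and mutating cells point by point, B builds a set of adjusted coordinates once and constructs the grid directly with a nested comprehension over all output cells.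
import Mathlib
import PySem

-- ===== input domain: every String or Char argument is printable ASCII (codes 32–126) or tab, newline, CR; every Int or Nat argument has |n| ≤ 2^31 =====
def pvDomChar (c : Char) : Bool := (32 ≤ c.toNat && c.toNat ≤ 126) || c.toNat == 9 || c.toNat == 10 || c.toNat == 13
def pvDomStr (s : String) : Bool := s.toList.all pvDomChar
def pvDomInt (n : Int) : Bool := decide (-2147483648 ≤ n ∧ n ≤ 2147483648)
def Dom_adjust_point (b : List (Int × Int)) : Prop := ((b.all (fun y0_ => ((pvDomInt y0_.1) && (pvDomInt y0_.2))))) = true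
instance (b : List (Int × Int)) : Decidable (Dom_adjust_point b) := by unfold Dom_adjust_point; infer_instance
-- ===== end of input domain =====

-- B replaces the zero-grid-then-mutate construction by a set of adjusted points and a
-- nested comprehension over all output cells (idiomatic; same asymptotic cost).

-- ===== PORT A =====
def adjust_point (b : List (Int × Int)) : List (List Int) :=
  match PySem.List.min? (b.map Prod.fst) (fun x => x), PySem.List.min? (b.map Prod.snd) (fun x => x),
        PySem.List.max? (b.map Prod.fst) (fun x => x), PySem.List.max? (b.map Prod.snd) (fun x => x) with
  | some min_x, some min_y, some max_x, some max_y =>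
      let width := max_x - min_x + 1
      let height := max_y - min_y + 1
      let bigger := max height width
      let square := (PySem.List.pyRange 0 bigger 1).map (fun _ => List.replicate bigger.toNat (0 : Int))
      b.foldl (fun sq p =>
        let adj_x := p.1 - min_x
        let adj_y := p.2 - min_y
        PySem.List.pySetD sq adj_y (PySem.List.pySetD (PySem.List.pyGetD sq adj_y []) adj_x 1)) square
  | _, _, _, _ => []   -- unreachable under Pre_ (empty b: Python min raises ValueError)

-- ===== PORT B =====
def adjust_point_alt (b : List (Int × Int)) : List (List Int) :=
  match PySem.List.min? (b.map Prod.fst) (fun x => x), PySem.List.min? (b.map Prod.snd) (fun x => x) with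
  | some min_x, some min_y =>
    match PySem.List.max? (b.map Prod.fst) (fun x => x), PySem.List.max? (b.map Prod.snd) (fun x => x) with
    | some max_x, some max_y =>
      let width := max_x - min_x + 1
      let height := max_y - min_y + 1
      let bigger := max height width
      let pts : PySem.Set (Int × Int) := PySem.Set.ofList (b.map (fun p => (p.1 - min_x, p.2 - min_y)))
      (PySem.List.pyRange 0 bigger 1).map (fun y =>
        (PySem.List.pyRange 0 bigger 1).map (fun x =>
          if PySem.Set.contains pts (x, y) then (1 : Int) else 0))
    | none, _ => []      -- unreachable under Pre_
    | some _, none => []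
  | none, _ => []        -- unreachable under Pre_
  | some _, none => []

-- ===== PRECONDITION & SPEC =====
-- Pre_ excludes only the empty list, on which Python's min raises ValueError (both A and B raise there).
def Pre_adjust_point (b : List (Int × Int)) : Prop := b ≠ []
instance (b : List (Int × Int)) : Decidable (Pre_adjust_point b) := by unfold Pre_adjust_point; infer_instance
def pvWitness_adjust_point : (List (Int × Int)) := [((0 : Int), (0 : Int)), ((2 : Int), (1 : Int))]

def Spec_adjust_point (b : List (Int × Int)) (out : List (List Int)) : Prop := out = adjust_point_alt b
instance (b : List (Int × Int)) (out : List (List Int)) : Decidable (Spec_adjust_point b out) := by unfold Spec_adjust_point; infer_instance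

-- ===== CLAIM (what is proved, stated in full; the proofs are below) =====
def Claim_equal_adjust_point : Prop := ∀ (b : List (Int × Int)), Dom_adjust_point b → Pre_adjust_point b → Spec_adjust_point b (adjust_point b)

-- ===== LEMMAS AND PROOFS =====

-- cell (row y, column x) of a grid, default 0
def pvCell (g : List (List Int)) (y x : Nat) : Int := (g.getD y []).getD x 0

-- the marking step of A's loop
def pvMark (mx my : Int) (sq : List (List Int)) (p : Int × Int) : List (List Int) :=
  PySem.List.pySetD sq (p.2 - my) (PySem.List.pySetD (PySem.List.pyGetD sq (p.2 - my) []) (p.1 - mx) 1)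

lemma pvGetD_set {α : Type} (l : List α) (d : α) (i : Nat) (v : α) (x : Nat) (hi : i < l.length) :
    (l.set i v).getD x d = if x = i then v else l.getD x d := by
  by_cases h : x = i
  · subst h; simp [List.getD, hi]
  · simp [List.getD, h, Ne.symm h]

-- in-range bundle for a point wrt a grid of g.length rows and row width w
def pvInRange (mx my : Int) (n w : Nat) (p : Int × Int) : Prop :=
  0 ≤ p.2 - my ∧ (p.2 - my).toNat < n ∧ 0 ≤ p.1 - mx ∧ (p.1 - mx).toNat < w

lemma pvMark_eq_set (mx my : Int) (g : List (List Int)) (p : Int × Int) {w : Nat}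
    (h : pvInRange mx my g.length w p) :
    pvMark mx my g p =
      g.set (p.2 - my).toNat
        ((g.getD (p.2 - my).toNat []).set (p.1 - mx).toNat 1) := by
  obtain ⟨hy0, hyn, hx0, _⟩ := h
  unfold pvMark
  rw [PySem.List.pySetD_of_nonneg _ _ hy0, PySem.List.pySetD_of_nonneg _ _ hx0,
      PySem.List.pyGetD_eq_getElem _ _ hy0 (by omega : p.2 - my < (g.length : Int)),
      List.getD_eq_getElem g [] hyn]

lemma pvRow_mem (g : List (List Int)) (j : Nat) (hj : j < g.length) : g.getD j [] ∈ g := by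
  rw [List.getD_eq_getElem g [] hj]; exact List.getElem_mem hj

lemma pvMark_shape (mx my : Int) (g : List (List Int)) (p : Int × Int) (w : Nat)
    (hw : ∀ r ∈ g, r.length = w) (h : pvInRange mx my g.length w p) :
    (pvMark mx my g p).length = g.length ∧ (∀ r ∈ (pvMark mx my g p), r.length = w) := by
  rw [pvMark_eq_set mx my g p h]
  refine ⟨by simp, ?_⟩
  intro r hr
  rcases List.mem_or_eq_of_mem_set hr with h1 | h1
  · exact hw r h1
  · subst h1
    rw [List.length_set]
    exact hw _ (pvRow_mem g _ h.2.1)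

lemma pvMark_cell (mx my : Int) (g : List (List Int)) (p : Int × Int) (w : Nat)
    (hw : ∀ r ∈ g, r.length = w) (h : pvInRange mx my g.length w p)
    (y x : Nat) :
    pvCell (pvMark mx my g p) y x =
      if p.1 - mx = (x : Int) ∧ p.2 - my = (y : Int) then 1 else pvCell g y x := by
  obtain ⟨hy0, hyn, hx0, hxw⟩ := h
  have hrow : (g.getD (p.2 - my).toNat []).length = w := hw _ (pvRow_mem g _ hyn)
  rw [pvMark_eq_set mx my g p ⟨hy0, hyn, hx0, hxw⟩]
  unfold pvCell
  rw [pvGetD_set g [] _ _ y hyn]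
  by_cases hy : y = (p.2 - my).toNat
  · rw [if_pos hy, pvGetD_set _ 0 _ _ x (by rw [hrow]; exact hxw)]
    by_cases hx : x = (p.1 - mx).toNat
    · rw [if_pos hx, if_pos ⟨by omega, by omega⟩]
    · rw [if_neg hx, if_neg (by rintro ⟨h1, h2⟩; exact hx (by omega)), hy]
  · rw [if_neg hy, if_neg (by rintro ⟨h1, h2⟩; exact hy (by omega))]

lemma pvFold_shape (mx my : Int) (l : List (Int × Int)) (g : List (List Int)) (w : Nat)
    (hw : ∀ r ∈ g, r.length = w) (hl : ∀ p ∈ l, pvInRange mx my g.length w p) :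
    (l.foldl (pvMark mx my) g).length = g.length ∧ ∀ r ∈ l.foldl (pvMark mx my) g, r.length = w := by
  induction l generalizing g with
  | nil => exact ⟨rfl, hw⟩
  | cons p t ih =>
    obtain ⟨h1, h2⟩ := pvMark_shape mx my g p w hw (hl p (by simp))
    obtain ⟨h3, h4⟩ := ih (pvMark mx my g p) h2 (fun q hq => by rw [h1]; exact hl q (by simp [hq]))
    exact ⟨by simp only [List.foldl_cons]; omega, by simpa [List.foldl_cons] using h4⟩

lemma pvFold_cell (mx my : Int) (l : List (Int × Int)) (g : List (List Int)) (w : Nat)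
    (hw : ∀ r ∈ g, r.length = w) (hl : ∀ p ∈ l, pvInRange mx my g.length w p)
    (y x : Nat) :
    pvCell (l.foldl (pvMark mx my) g) y x =
      if ∃ p ∈ l, p.1 - mx = (x : Int) ∧ p.2 - my = (y : Int) then 1 else pvCell g y x := by
  induction l generalizing g with
  | nil => simp
  | cons p t ih =>
    obtain ⟨h1, h2⟩ := pvMark_shape mx my g p w hw (hl p (by simp))
    rw [List.foldl_cons,
        ih (pvMark mx my g p) h2 (fun q hq => by rw [h1]; exact hl q (by simp [hq])),
        pvMark_cell mx my g p w hw (hl p (by simp)) y x]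
    by_cases ht : ∃ q ∈ t, q.1 - mx = (x : Int) ∧ q.2 - my = (y : Int)
    · rw [if_pos ht, if_pos ⟨ht.choose, by simpa using ⟨Or.inr ht.choose_spec.1, ht.choose_spec.2⟩⟩]
    · rw [if_neg ht]
      by_cases hp : p.1 - mx = (x : Int) ∧ p.2 - my = (y : Int)
      · rw [if_pos hp, if_pos ⟨p, by simp, hp⟩]
      · rw [if_neg hp, if_neg (by
          rintro ⟨q, hq, hqe⟩
          rcases List.mem_cons.1 hq with rfl | hq'
          · exact hp hqe
          · exact ht ⟨q, hq', hqe⟩)]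

-- ===== VERDICT (by name: the statement is the Claim_ definition above) =====
lemma pvCell_init (m : Int) (w y x : Nat) :
    pvCell ((PySem.List.pyRange 0 m 1).map (fun _ => List.replicate w (0 : Int))) y x = 0 := by
  unfold pvCell
  rcases Nat.lt_or_ge y ((PySem.List.pyRange 0 m 1).map (fun _ => List.replicate w (0 : Int))).length with h | h
  · rw [List.getD_eq_getElem _ [] h, List.getElem_map]
    simp [List.getD]
  · rw [List.getD_eq_default _ [] h]
    simp [List.getD]

theorem adjust_point_spec : Claim_equal_adjust_point := by
  intro b _ hpre
  unfold Spec_adjust_point adjust_point adjust_point_alt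
  obtain ⟨mx, h1⟩ : ∃ m, PySem.List.min? (b.map Prod.fst) (fun x => x) = some m := by
    rcases hc : PySem.List.min? (b.map Prod.fst) (fun x => x) with _ | m
    · exact absurd (by simpa using ((PySem.List.min?_eq_none_iff _ _).mp hc)) hpre
    · exact ⟨m, rfl⟩
  obtain ⟨my, h2⟩ : ∃ m, PySem.List.min? (b.map Prod.snd) (fun x => x) = some m := by
    rcases hc : PySem.List.min? (b.map Prod.snd) (fun x => x) with _ | m
    · exact absurd (by simpa using ((PySem.List.min?_eq_none_iff _ _).mp hc)) hpre
    · exact ⟨m, rfl⟩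
  obtain ⟨Mx, h3⟩ : ∃ m, PySem.List.max? (b.map Prod.fst) (fun x => x) = some m := by
    rcases hc : PySem.List.max? (b.map Prod.fst) (fun x => x) with _ | m
    · exact absurd (by simpa using ((PySem.List.max?_eq_none_iff _ _).mp hc)) hpre
    · exact ⟨m, rfl⟩
  obtain ⟨My, h4⟩ : ∃ m, PySem.List.max? (b.map Prod.snd) (fun x => x) = some m := by
    rcases hc : PySem.List.max? (b.map Prod.snd) (fun x => x) with _ | m
    · exact absurd (by simpa using ((PySem.List.max?_eq_none_iff _ _).mp hc)) hpre
    · exact ⟨m, rfl⟩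
  simp only [h1, h2, h3, h4]
  -- bounds
  have hmx : ∀ p ∈ b, mx ≤ p.1 := fun p hp => PySem.List.min?_isMin h1 p.1 (List.mem_map_of_mem hp)
  have hmy : ∀ p ∈ b, my ≤ p.2 := fun p hp => PySem.List.min?_isMin h2 p.2 (List.mem_map_of_mem hp)
  have hMx : ∀ p ∈ b, p.1 ≤ Mx := fun p hp => PySem.List.max?_isMax h3 p.1 (List.mem_map_of_mem hp)
  have hMy : ∀ p ∈ b, p.2 ≤ My := fun p hp => PySem.List.max?_isMax h4 p.2 (List.mem_map_of_mem hp)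
  set bigger := max (My - my + 1) (Mx - mx + 1) with hbdef
  set n : Nat := bigger.toNat with hndef
  obtain ⟨p0, hp0⟩ := List.exists_mem_of_ne_nil b hpre
  have hbig1 : (1 : Int) ≤ bigger := by
    have := hmy p0 hp0; have := hMy p0 hp0; omega
  have hrange : ∀ p ∈ b, pvInRange mx my n n p := by
    intro p hp
    have e1 := hmx p hp; have e2 := hmy p hp; have e3 := hMx p hp; have e4 := hMy p hp
    refine ⟨by omega, by omega, by omega, by omega⟩
  -- initial grid
  set sq0 : List (List Int) := (PySem.List.pyRange 0 bigger 1).map (fun _ => List.replicate n (0 : Int)) with hsq0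
  have hsq0len : sq0.length = n := by
    simp [hsq0, PySem.List.length_pyRange_one]; omega
  have hsq0w : ∀ r ∈ sq0, r.length = n := by
    intro r hr
    rcases List.mem_map.1 hr with ⟨_, _, rfl⟩
    simp
  have hrange' : ∀ p ∈ b, pvInRange mx my sq0.length n p := by
    intro p hp; rw [hsq0len]; exact hrange p hp
  have hfold := pvFold_shape mx my b sq0 n hsq0w hrange'
  -- the fold in port A is pvMark
  show b.foldl (pvMark mx my) sq0 = _
  apply List.ext_getElem
  · rw [hfold.1, hsq0len]
    simp [PySem.List.length_pyRange_one]
    omega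
  · intro y hyL hyR
    have hyn : y < n := by rw [hfold.1, hsq0len] at hyL; exact hyL
    apply List.ext_getElem
    · rw [hfold.2 _ (List.getElem_mem hyL)]
      simp [PySem.List.length_pyRange_one]
      omega
    · intro x hxL hxR
      have hxn : x < n := by rw [hfold.2 _ (List.getElem_mem hyL)] at hxL; exact hxL
      have hcell := pvFold_cell mx my b sq0 n hsq0w hrange' y x
      rw [pvCell_init bigger n y x] at hcell
      have hL : (b.foldl (pvMark mx my) sq0)[y][x] = pvCell (b.foldl (pvMark mx my) sq0) y x := by
        unfold pvCell
        rw [List.getD_eq_getElem _ [] hyL, List.getD_eq_getElem _ 0 hxL]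
      rw [hL, hcell]
      -- right side
      simp only [List.getElem_map, PySem.List.getElem_pyRange_one, zero_add]
      by_cases hex : ∃ p ∈ b, p.1 - mx = ((x : Nat) : Int) ∧ p.2 - my = ((y : Nat) : Int)
      · rw [if_pos hex, if_pos]
        rw [PySem.Set.contains_iff, PySem.Set.mem_ofList, List.mem_map]
        obtain ⟨p, hp, e1, e2⟩ := hex
        exact ⟨p, hp, by rw [e1, e2]⟩
      · rw [if_neg hex, if_neg]
        rw [PySem.Set.contains_iff, PySem.Set.mem_ofList, List.mem_map]
        rintro ⟨p, hp, he⟩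
        exact hex ⟨p, hp, congrArg Prod.fst he, congrArg Prod.snd he⟩
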